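-- pv_equiv track=rewrite | github.com/Miami-stack/moon_kraters | main.py | calculate
-- ===== SOURCE A (Python) =====
-- from typing import Any
--
-- def calculate(matrix1: Any, query1: list) -> int:
--     """Эта функция находит и подсчитывает кратеры."""
--     searchlist = []
--     if all(matrix1[matrix1[0][:] == 1]):
--         searchlist.append(1)
--     for row in matrix1:
--         search = all(x in row for x in query1)
--         if search is True:
--             searchlist.append(search)
--
--     return len(searchlist)
-- ===== SOURCE B (Python) =====
-- def calculate(matrix1, query1):
--     # A's first line: matrix1[matrix1[0][:] == 1] indexes with False, i.e. matrix1[0]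
--     bonus = 1 if all(matrix1[0]) else 0
--     surviving = set(range(len(matrix1)))
--     for x in set(query1):
--         surviving = {i for i in surviving if x in matrix1[i]}
--     return bonus + len(surviving)
-- ===== Notes on version B (the rewrite author's own statement) =====
-- stated objective: alternative
-- what changed: Instead of scanning row-by-row and appending flags to a list, B keeps a set of surviving row indices and intersects it with the index set of each distinct query element (inverted/transposed pass), adding the first-line bonus term (matrix1[False] == matrix1[0]) computed once.
import Mathlib
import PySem

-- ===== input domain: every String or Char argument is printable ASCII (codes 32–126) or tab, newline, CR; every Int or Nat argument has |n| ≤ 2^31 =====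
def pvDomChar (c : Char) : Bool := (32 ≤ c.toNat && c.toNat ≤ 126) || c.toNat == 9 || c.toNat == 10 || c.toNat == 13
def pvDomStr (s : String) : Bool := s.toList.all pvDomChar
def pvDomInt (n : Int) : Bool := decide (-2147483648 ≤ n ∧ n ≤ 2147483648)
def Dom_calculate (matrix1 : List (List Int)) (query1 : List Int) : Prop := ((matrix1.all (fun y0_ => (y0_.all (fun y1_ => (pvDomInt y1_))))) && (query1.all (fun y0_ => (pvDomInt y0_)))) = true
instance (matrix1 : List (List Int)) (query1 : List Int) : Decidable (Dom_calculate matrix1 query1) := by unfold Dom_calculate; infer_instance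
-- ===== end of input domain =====

-- B replaces A's row-by-row scan (appending flags to a list) by an inverted pass: a surviving
-- set of row indices intersected with each distinct query element's index set, plus the first-row bonus term evaluated once.


-- ===== PORT A =====
-- matrix1[matrix1[0][:] == 1]: a list copy never equals the int 1, so the index is False = 0,
-- i.e. the condition is all(matrix1[0]); matrix1[0] raises IndexError on an empty matrix1 (Pre_).
def calculate (matrix1 : List (List Int)) (query1 : List Int) : Int :=
  let searchlist : List Unit := []
  let searchlist :=
    if ((PySem.List.pyGet? matrix1 0).getD []).all (fun x => x != 0)
    then searchlist ++ [()] else searchlist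
  let searchlist := matrix1.foldl (fun acc row =>
    if query1.all (fun x => row.contains x) then acc ++ [()] else acc) searchlist
  (searchlist.length : Int)

-- ===== PORT B =====
def calculate_alt (matrix1 : List (List Int)) (query1 : List Int) : Int :=
  let bonus : Int :=
    if ((PySem.List.pyGet? matrix1 0).getD []).all (fun x => x != 0) then 1 else 0
  let surviving : List Nat := List.range matrix1.length
  let surviving := (PySem.Set.ofList query1).foldl
    (fun surv x => surv.filter (fun i => (matrix1.getD i []).contains x)) surviving
  bonus + (surviving.length : Int)

-- ===== PRECONDITION & SPEC =====
-- Pre_ excludes only the empty matrix, on which A (and B) raise IndexError at matrix1[0].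
def Pre_calculate (matrix1 : List (List Int)) (query1 : List Int) : Prop := matrix1 ≠ []
instance (matrix1 : List (List Int)) (query1 : List Int) : Decidable (Pre_calculate matrix1 query1) := by unfold Pre_calculate; infer_instance
def pvWitness_calculate : List (List Int) × List Int := ([[1, 2], [3]], [1])

def Spec_calculate (matrix1 : List (List Int)) (query1 : List Int) (out : Int) : Prop := out = calculate_alt matrix1 query1
instance (matrix1 : List (List Int)) (query1 : List Int) (out : Int) : Decidable (Spec_calculate matrix1 query1 out) := by unfold Spec_calculate; infer_instance

-- ===== CLAIM (what is proved, stated in full; the proofs are below) =====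
def Claim_equal_calculate : Prop := ∀ (matrix1 : List (List Int)) (query1 : List Int), Dom_calculate matrix1 query1 → Pre_calculate matrix1 query1 → Spec_calculate matrix1 query1 (calculate matrix1 query1)

-- ===== LEMMAS AND PROOFS =====

-- A's loop: the flag list only grows; its final length is the initial length plus a row count.
theorem pv_foldl_append_len (P : List Int → Bool) :
    ∀ (l : List (List Int)) (acc : List Unit),
      (l.foldl (fun acc row => if P row then acc ++ [()] else acc) acc).length
        = acc.length + l.countP P := by
  intro l
  induction l with
  | nil => intro acc; simp
  | cons r rs ih =>
      intro acc
      simp only [List.foldl_cons, List.countP_cons]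
      by_cases h : P r = true <;> simp [h, ih] <;> omega

-- B's loop: successive filters are one filter by the conjunction of the predicates.
theorem pv_foldl_filter (p : Int → Nat → Bool) :
    ∀ (qs : List Int) (l : List Nat),
      qs.foldl (fun s x => s.filter (p x)) l
        = l.filter (fun i => qs.all (fun x => p x i)) := by
  intro qs
  induction qs with
  | nil => intro l; simp
  | cons q qs ih =>
      intro l
      simp only [List.foldl_cons, ih, List.filter_filter, List.all_cons]
      congr 1
      funext i
      by_cases h : p q i = true <;> simp [h]

-- dedup does not change an 'all' test.
theorem pv_all_ofList (p : Int → Bool) (qs : List Int) :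
    (PySem.Set.ofList qs).all (fun x => p x) = qs.all (fun x => p x) := by
  rw [Bool.eq_iff_iff]
  simp only [List.all_eq_true]
  constructor
  · intro h x hx
    exact h x ((PySem.Set.mem_ofList qs x).mpr hx)
  · intro h x hx
    exact h x ((PySem.Set.mem_ofList qs x).mp hx)

-- row count = count over indices.
theorem pv_countP_range (P : List Int → Bool) :
    ∀ (l : List (List Int)),
      l.countP P = ((List.range l.length).filter (fun i => P (l.getD i []))).length := by
  intro l
  induction l with
  | nil => simp
  | cons r rs ih =>
      simp only [List.countP_cons, List.length_cons, List.range_succ_eq_map,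
        List.filter_cons, List.filter_map, List.length_map]
      by_cases h : P r = true <;>
        simp [h, ih, Function.comp_def] <;> omega

theorem calculate_spec_aux (matrix1 : List (List Int)) (query1 : List Int) :
    calculate matrix1 query1 = calculate_alt matrix1 query1 := by
  unfold calculate calculate_alt
  have hfun : (fun i : Nat => (PySem.Set.ofList query1).all (fun x => (matrix1.getD i []).contains x))
      = (fun i : Nat => query1.all (fun x => (matrix1.getD i []).contains x)) := by
    funext i; exact pv_all_ofList _ _
  simp only [pv_foldl_append_len, pv_foldl_filter, pv_countP_range, hfun]
  by_cases h : ((PySem.List.pyGet? matrix1 0).getD []).all (fun x => x != 0) = true <;>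
    simp [h] <;> omega

-- ===== VERDICT (by name: the statement is the Claim_ definition above) =====
theorem calculate_spec : Claim_equal_calculate := by
  intro matrix1 query1 _ _
  exact calculate_spec_aux matrix1 query1
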